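-- pv_equiv track=rewrite | github.com/shanewilkins/roadmap | roadmap/adapters/cli/projects/view.py | _extract_description_and_objectives
-- ===== SOURCE A (Python) =====
-- def _is_objectives_header(line):
--     """Check if line is objectives header."""
--     return "## Objectives" in line or "## objectives" in line.lower()
--
-- def _is_other_header(line):
--     """Check if line is a header (but not objectives)."""
--     return line.startswith("## ")
--
-- def _extract_description_and_objectives(content):
--     """Extract description and objectives from project content."""
--     if not content:
--         return None, None
--
--     content_lines = content.split("\n")
--     description_lines = []
--     objectives_lines = []
--     in_objectives = False
--
--     for line in content_lines:
--         if _is_objectives_header(line):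
--             in_objectives = True
--             continue
--         elif in_objectives and _is_other_header(line):
--             in_objectives = False
--
--         if in_objectives:
--             objectives_lines.append(line)
--         elif not _is_other_header(line):
--             description_lines.append(line)
--
--     description = "\n".join(description_lines).strip() or None
--     objectives = "\n".join(objectives_lines).strip() or None
--
--     return description, objectives
-- ===== SOURCE B (Python) =====
-- def _extract_description_and_objectives(content):
--     """Extract description and objectives from project content."""
--     if not content:
--         return None, None
--
--     lines = content.split("\n")
--     # Pass 1: label each line (is_objectives_header, belongs_to_objectives)
--     labels = []
--     state = False
--     for line in lines:
--         if "## Objectives" in line or "## objectives" in line.lower():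
--             state = True
--             labels.append((True, False))
--         else:
--             if state and line.startswith("## "):
--                 state = False
--             labels.append((False, state))
--
--     # Pass 2: comprehensions over the labelled lines
--     objectives_lines = [ln for ln, (h, ob) in zip(lines, labels) if ob]
--     description_lines = [
--         ln for ln, (h, ob) in zip(lines, labels)
--         if not ob and not h and not ln.startswith("## ")
--     ]
--
--     description = "\n".join(description_lines).strip() or None
--     objectives = "\n".join(objectives_lines).strip() or None
--     return description, objectives
-- ===== Notes on version B (the rewrite author's own statement) =====
-- stated objective: alternative
-- what changed: Replaces the single stateful loop that appends into two buckets with a two-pass decomposition: a first pass labels each line (objectives-header / inside-objectives) and a second pass builds both buckets by plain comprehensions over the labelled lines.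
import Mathlib
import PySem

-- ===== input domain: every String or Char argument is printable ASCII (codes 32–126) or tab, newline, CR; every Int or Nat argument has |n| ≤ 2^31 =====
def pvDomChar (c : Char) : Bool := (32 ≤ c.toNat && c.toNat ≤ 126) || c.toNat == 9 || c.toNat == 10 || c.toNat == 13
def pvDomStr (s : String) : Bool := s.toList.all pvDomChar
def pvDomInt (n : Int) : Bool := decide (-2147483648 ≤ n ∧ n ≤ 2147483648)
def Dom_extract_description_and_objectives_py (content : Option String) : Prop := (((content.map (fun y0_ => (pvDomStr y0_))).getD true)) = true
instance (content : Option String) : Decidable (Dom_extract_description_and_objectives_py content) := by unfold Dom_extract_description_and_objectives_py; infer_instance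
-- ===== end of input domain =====

-- B replaces A's single stateful two-bucket loop by a labelling pass plus two filter passes (objective: alternative decomposition, same cost).

-- ===== PORT A =====
-- _is_objectives_header
def pvIsObjHeader (line : String) : Bool :=
  PySem.Str.isIn "## Objectives" line || PySem.Str.isIn "## objectives" (PySem.Str.lower line)

-- _is_other_header
def pvIsOtherHeader (line : String) : Bool :=
  PySem.Str.startswith line "## "

-- '\n'.join(ls).strip() or None
def pvFinish (ls : List String) : Option String :=
  let t := PySem.Str.strip (PySem.Str.join "\n" ls)
  if t = "" then none else some t

-- the body of A's for-loop, as a fold step over (description_lines, objectives_lines, in_objectives)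
def pvStepA (st : List String × List String × Bool) (line : String) : List String × List String × Bool :=
  let (d, o, inObj) := st
  if pvIsObjHeader line then (d, o, true)
  else
    let inObj := if inObj && pvIsOtherHeader line then false else inObj
    if inObj then (d, o ++ [line], inObj)
    else if !pvIsOtherHeader line then (d ++ [line], o, inObj)
    else (d, o, inObj)

def extract_description_and_objectives_py (content : Option String) : Option String × Option String :=
  match content with
  | none => (none, none)
  | some s =>
    if s = "" then (none, none)
    else
      let contentLines := (PySem.Str.split? s "\n").getD []   -- sep "\n" ≠ "", so split? is always `some`
      let st := contentLines.foldl pvStepA ([], [], false)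
      (pvFinish st.1, pvFinish st.2.1)

-- ===== PORT B =====
-- pass 1 loop body: labels each line with (is_objectives_header, belongs_to_objectives)
def pvStepB (st : List (Bool × Bool) × Bool) (line : String) : List (Bool × Bool) × Bool :=
  let (labels, state) := st
  if pvIsObjHeader line then (labels ++ [(true, false)], true)
  else
    let state := if state && pvIsOtherHeader line then false else state
    (labels ++ [(false, state)], state)

def extract_description_and_objectives_py_alt (content : Option String) : Option String × Option String :=
  match content with
  | none => (none, none)
  | some s =>
    if s = "" then (none, none)
    else
      let lines := (PySem.Str.split? s "\n").getD []
      let labels := (lines.foldl pvStepB ([], false)).1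
      let objectivesLines := ((lines.zip labels).filter (fun p => p.2.2)).map Prod.fst
      let descriptionLines := ((lines.zip labels).filter
        (fun p => !p.2.2 && !p.2.1 && !PySem.Str.startswith p.1 "## ")).map Prod.fst
      (pvFinish descriptionLines, pvFinish objectivesLines)

-- ===== PRECONDITION & SPEC =====
def Spec_extract_description_and_objectives_py (content : Option String) (out : Option String × Option String) : Prop := out = extract_description_and_objectives_py_alt content
instance (content : Option String) (out : Option String × Option String) : Decidable (Spec_extract_description_and_objectives_py content out) := by unfold Spec_extract_description_and_objectives_py; infer_instance

-- ===== CLAIM (what is proved, stated in full; the proofs are below) =====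
def Claim_equal_extract_description_and_objectives_py : Prop := ∀ (content : Option String), Dom_extract_description_and_objectives_py content → Spec_extract_description_and_objectives_py content (extract_description_and_objectives_py content)

-- ===== LEMMAS AND PROOFS =====

-- recursive restatement of B's labelling pass (label list from a start state)
def pvLab (lines : List String) (s : Bool) : List (Bool × Bool) :=
  match lines with
  | [] => []
  | l :: ls =>
    if pvIsObjHeader l then (true, false) :: pvLab ls true
    else
      let s' := if s && pvIsOtherHeader l then false else s
      (false, s') :: pvLab ls s'

-- final state of the labelling pass
def pvLabSt (lines : List String) (s : Bool) : Bool :=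
  match lines with
  | [] => s
  | l :: ls =>
    if pvIsObjHeader l then pvLabSt ls true
    else pvLabSt ls (if s && pvIsOtherHeader l then false else s)

lemma pvStepB_fold (lines : List String) (acc : List (Bool × Bool)) (s : Bool) :
    lines.foldl pvStepB (acc, s) = (acc ++ pvLab lines s, pvLabSt lines s) := by
  induction lines generalizing acc s with
  | nil => simp [pvLab, pvLabSt]
  | cons l ls ih =>
    simp only [List.foldl_cons, pvStepB, pvLab, pvLabSt]
    by_cases h : pvIsObjHeader l = true <;> simp [h, ih]

def pvDescOf (lines : List String) (s : Bool) : List String :=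
  ((lines.zip (pvLab lines s)).filter
    (fun p => !p.2.2 && !p.2.1 && !PySem.Str.startswith p.1 "## ")).map Prod.fst

def pvObjOf (lines : List String) (s : Bool) : List String :=
  ((lines.zip (pvLab lines s)).filter (fun p => p.2.2)).map Prod.fst

lemma pvStepA_fold (lines : List String) (d o : List String) (s : Bool) :
    lines.foldl pvStepA (d, o, s) = (d ++ pvDescOf lines s, o ++ pvObjOf lines s, pvLabSt lines s) := by
  induction lines generalizing d o s with
  | nil => simp [pvDescOf, pvObjOf, pvLab, pvLabSt]
  | cons l ls ih =>
    simp only [List.foldl_cons]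
    by_cases h : pvIsObjHeader l = true
    · simp [pvStepA, h, pvDescOf, pvObjOf, pvLab, pvLabSt, ih]
    · by_cases ho : PySem.Chars.startswith l.toList ['#', '#', ' '] = true <;>
        cases s <;>
        simp [pvStepA, pvIsOtherHeader, h, ho, pvDescOf, pvObjOf, pvLab, pvLabSt, ih,
          List.append_assoc]

-- ===== VERDICT (by name: the statement is the Claim_ definition above) =====
theorem extract_description_and_objectives_py_spec : Claim_equal_extract_description_and_objectives_py := by
  intro content _
  unfold Spec_extract_description_and_objectives_py
  cases content with
  | none => rfl
  | some s =>
    by_cases hs : s = ""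
    · simp [extract_description_and_objectives_py, extract_description_and_objectives_py_alt, hs]
    · simp only [extract_description_and_objectives_py, extract_description_and_objectives_py_alt,
        hs, if_false]
      rw [pvStepA_fold, pvStepB_fold]
      simp [pvDescOf, pvObjOf]
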